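-- pv_equiv track=rewrite | github.com/ygambhir/kata | kata.py | determine_delimiter
-- ===== SOURCE A (Python) =====
-- def determine_delimiter(str):
--     delimiter = []
--     if str[0] == '/':
--         delimiter.append(str[2])
--     else:
--         delimiter.append(',')
--
--     if delimiter[0] == '[':
--         delimiter = []
--         this_delimiter = ''
--         for char in str[3:]:
--             if char == '\n':
--                 break
--             if char == ']':
--                 delimiter.append(this_delimiter)
--                 continue
--             elif char == '[':
--                 this_delimiter = ''
--             else:
--                 this_delimiter += char
--     return delimiter
-- ===== SOURCE B (Python) =====
-- def determine_delimiter(str):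
--     if str[0] != '/':
--         return [',']
--     if str[2] != '[':
--         return [str[2]]
--     # delimiters are declared as bracketed tokens: take the payload up to the
--     # first newline and read off the text between each '[' and its closing ']'
--     content = str[3:].split('\n', 1)[0]
--     return [seg.split(']')[0] for seg in content.split('[') if ']' in seg]
-- ===== Notes on version B (the rewrite author's own statement) =====
-- stated objective: alternative
-- what changed: Replaces A's char-by-char state machine (running accumulator with break/continue) with a split-based pipeline: truncate the payload at the first newline, split on '[' and emit the text before the first ']' of each segment that has one.
-- intended difference: On inputs whose bracket payload (before the first newline) contains a segment with two or more ']' (unbalanced brackets, e.g. '/,[a]b]'), A keeps appending its never-reset accumulator at every ']' and returns ['a','ab'], while B returns one delimiter per bracketed token (['a']), the intended parse. — e.g. on determine_delimiter("/,[a]b]"): A returns ["a", "ab"], B returns ["a"]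
-- outside the precondition, e.g. on determine_delimiter(''): A raises IndexError, B raises IndexError; on determine_delimiter('/'): A raises IndexError, B raises IndexError
import Mathlib
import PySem

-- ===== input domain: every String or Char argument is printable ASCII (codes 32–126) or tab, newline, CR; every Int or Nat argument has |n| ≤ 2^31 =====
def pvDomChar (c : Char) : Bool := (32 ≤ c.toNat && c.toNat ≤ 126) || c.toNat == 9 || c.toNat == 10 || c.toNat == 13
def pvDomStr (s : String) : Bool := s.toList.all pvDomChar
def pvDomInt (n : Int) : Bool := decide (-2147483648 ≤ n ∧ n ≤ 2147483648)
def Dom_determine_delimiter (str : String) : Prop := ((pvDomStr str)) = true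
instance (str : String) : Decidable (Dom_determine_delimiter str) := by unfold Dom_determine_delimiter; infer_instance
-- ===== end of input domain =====

-- B replaces A's char-by-char accumulator state machine with a split pipeline (truncate at the
-- first newline, split on '[', take each segment's text before its first ']'); on unbalanced
-- payloads (a segment with two or more ']') the values intentionally differ — see D_ below.

-- ===== PORT A =====
-- the for-loop over str[3:] with break on '\n': state = (delimiter, this_delimiter)
def pvALoop : List Char → List String → List Char → List String
  | [], delim, _ => delim
  | c :: rest, delim, acc =>
    if c = '\n' then delim
    else if c = ']' then pvALoop rest (delim ++ [String.mk acc]) acc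
    else if c = '[' then pvALoop rest delim []
    else pvALoop rest delim (acc ++ [c])

def determine_delimiter (str : String) : List String :=
  match PySem.Str.pyGet? str 0 with
  | none => []                                   -- IndexError: excluded by Pre_
  | some c0 =>
    match (if c0 = '/' then PySem.Str.pyGet? str 2 else some ',') with
    | none => []                                 -- IndexError: excluded by Pre_
    | some d =>
      if d = '[' then pvALoop (str.toList.drop 3) [] []
      else [String.mk [d]]

-- ===== PORT B =====
-- literal port of Python str.split(sep) for a single-char sep (always returns a nonempty list)
def pvSplit (sep : Char) : List Char → List (List Char)
  | [] => [[]]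
  | c :: rest =>
    if c = sep then [] :: pvSplit sep rest
    else
      match pvSplit sep rest with
      | [] => [[c]]                              -- unreachable: pvSplit is never empty
      | p :: ps => (c :: p) :: ps

def determine_delimiter_alt (str : String) : List String :=
  match PySem.Str.pyGet? str 0 with
  | none => []                                   -- IndexError: excluded by Pre_
  | some c0 =>
    if c0 ≠ '/' then [","]
    else
      match PySem.Str.pyGet? str 2 with
      | none => []                               -- IndexError: excluded by Pre_
      | some d =>
        if d ≠ '[' then [String.mk [d]]
        else
          -- content = str[3:].split('\n', 1)[0]  (= everything before the first newline)
          let content := (str.toList.drop 3).takeWhile (· ≠ '\n')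
          -- [seg.split(']')[0] for seg in content.split('[') if ']' in seg]
          (pvSplit '[' content).filterMap
            (fun seg => if ']' ∈ seg then some (String.mk ((pvSplit ']' seg).headD [])) else none)

-- ===== PRECONDITION & SPEC =====
-- Pre_ excludes exactly the inputs where Python A raises IndexError: "" (str[0]) and strings
-- starting with '/' of length < 3 (str[2]); B raises there too.
def Pre_determine_delimiter (str : String) : Prop :=
  1 ≤ str.length ∧ (PySem.Str.pyGet? str 0 = some '/' → 3 ≤ str.length)
instance (str : String) : Decidable (Pre_determine_delimiter str) := by
  unfold Pre_determine_delimiter; infer_instance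
def pvWitness_determine_delimiter : String := "/,[a][b]"

-- helper used by D_: does the list contain two ']' with no '[' between them?
-- (seen = a ']' of the current bracket-free run has already been seen)
def pvDouble : List Char → Bool → Bool
  | [], _ => false
  | c :: rest, seen =>
    if c = '[' then pvDouble rest false
    else if c = ']' then (seen || pvDouble rest true)
    else pvDouble rest seen

-- On inputs whose bracket payload (before the first newline) contains a segment with two or more
-- ']' (unbalanced brackets, e.g. "/,[a]b]"), A keeps appending its never-reset accumulator at
-- every ']' and returns ["a","ab"], while B returns one delimiter per bracketed token (["a"]),
-- the intended parse.
def D_determine_delimiter (str : String) : Prop :=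
  PySem.Str.pyGet? str 0 = some '/' ∧ PySem.Str.pyGet? str 2 = some '[' ∧
  pvDouble ((str.toList.drop 3).takeWhile (· ≠ '\n')) false = true
instance (str : String) : Decidable (D_determine_delimiter str) := by
  unfold D_determine_delimiter; infer_instance

def Spec_determine_delimiter (str : String) (out : List String) : Prop :=
  ¬ D_determine_delimiter str → out = determine_delimiter_alt str
instance (str : String) (out : List String) : Decidable (Spec_determine_delimiter str out) := by unfold Spec_determine_delimiter; infer_instance

def pvDiffWitness_determine_delimiter : String := "/,[a]b]"
def pvDiffWitnessOut_determine_delimiter : (List String) × (List String) := (["a", "ab"], ["a"])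

-- ===== CLAIM (what is proved, stated in full; the proofs are below) =====
def Claim_unchanged_determine_delimiter : Prop := ∀ (str : String), Dom_determine_delimiter str → Pre_determine_delimiter str → Spec_determine_delimiter str (determine_delimiter str)
def Claim_changed_determine_delimiter : Prop := Dom_determine_delimiter (pvDiffWitness_determine_delimiter) ∧ Pre_determine_delimiter (pvDiffWitness_determine_delimiter) ∧ D_determine_delimiter (pvDiffWitness_determine_delimiter) ∧ determine_delimiter (pvDiffWitness_determine_delimiter) = pvDiffWitnessOut_determine_delimiter.1 ∧ determine_delimiter_alt (pvDiffWitness_determine_delimiter) = pvDiffWitnessOut_determine_delimiter.2 ∧ pvDiffWitnessOut_determine_delimiter.1 ≠ pvDiffWitnessOut_determine_delimiter.2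
def Claim_exact_determine_delimiter : Prop := ∀ (str : String), Dom_determine_delimiter str → Pre_determine_delimiter str → D_determine_delimiter str → determine_delimiter str ≠ determine_delimiter_alt str

-- ===== LEMMAS AND PROOFS =====

theorem pvSplit_ne_nil (sep : Char) (l : List Char) : pvSplit sep l ≠ [] := by
  cases l with
  | nil => simp [pvSplit]
  | cons c rest =>
    simp only [pvSplit]
    split
    · simp
    · cases h : pvSplit sep rest <;> simp

theorem pvSplit_cons_exists (sep : Char) (l : List Char) :
    ∃ p ps, pvSplit sep l = p :: ps := by
  cases h : pvSplit sep l with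
  | nil => exact absurd h (pvSplit_ne_nil sep l)
  | cons p ps => exact ⟨p, ps, rfl⟩

-- proof-side cumulative emitter: A emits, at each ']' of a segment, everything accumulated so far
def pvCum : List (List Char) → List Char → List String
  | [], _ => []
  | [_], _ => []
  | p :: rest, pre => String.mk (pre ++ p) :: pvCum rest (pre ++ p)

theorem pvCum_cons (c : Char) (q : List Char) (qs : List (List Char)) (pre : List Char) :
    pvCum ((c :: q) :: qs) pre = pvCum (q :: qs) (pre ++ [c]) := by
  cases qs with
  | nil => simp [pvCum]
  | cons r rs => simp [pvCum, List.append_assoc]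

-- A's loop distributes over the already-emitted delimiter list
theorem pvALoop_delim (chars : List Char) (delim : List String) (acc : List Char) :
    pvALoop chars delim acc = delim ++ pvALoop chars [] acc := by
  induction chars generalizing delim acc with
  | nil => simp [pvALoop]
  | cons c rest ih =>
    by_cases hn : c = '\n'
    · subst hn; simp [pvALoop]
    · by_cases h1 : c = ']'
      · subst h1
        have e : ∀ (d : List String) (a : List Char),
            pvALoop (']' :: rest) d a = pvALoop rest (d ++ [String.mk a]) a := fun _ _ => rfl
        rw [e, e, ih, ih ([] ++ [String.mk acc])]
        simp
      · by_cases h2 : c = '['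
        · subst h2
          have e : ∀ (d : List String) (a : List Char),
              pvALoop ('[' :: rest) d a = pvALoop rest d [] := fun _ _ => rfl
          rw [e, e]
          exact ih _ _
        · simp only [pvALoop, if_neg hn, if_neg h1, if_neg h2]
          exact ih _ _

-- pvH with prefix [] is the cumulative flatMap
def pvH (segs : List (List Char)) (acc : List Char) : List String :=
  match segs with
  | [] => []
  | s :: ss => pvCum (pvSplit ']' s) acc ++ ss.flatMap (fun seg => pvCum (pvSplit ']' seg) [])

theorem pvH_nil_acc (segs : List (List Char)) :
    pvH segs [] = segs.flatMap (fun seg => pvCum (pvSplit ']' seg) []) := by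
  cases segs <;> simp [pvH]

-- core invariant: A's loop body (on '\n'-free input) equals pvH of the '['-split
theorem pvLoop_eq_pvH (content : List Char) (acc : List Char)
    (hnl : '\n' ∉ content) :
    pvALoop content [] acc = pvH (pvSplit '[' content) acc := by
  induction content generalizing acc with
  | nil => simp [pvALoop, pvSplit, pvH, pvCum]
  | cons c rest ih =>
    have hcn : c ≠ '\n' := by intro h; exact hnl (h ▸ List.mem_cons_self)
    have hrest : '\n' ∉ rest := fun h => hnl (List.mem_cons_of_mem _ h)
    obtain ⟨p, ps, hps⟩ := pvSplit_cons_exists '[' rest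
    by_cases hb : c = ']'
    · subst hb
      have hA : pvALoop (']' :: rest) ([] : List String) acc
          = String.mk acc :: pvALoop rest [] acc := by
        have e : pvALoop (']' :: rest) ([] : List String) acc
            = pvALoop rest [String.mk acc] acc := rfl
        rw [e, pvALoop_delim]; simp
      rw [hA, ih _ hrest, hps]
      have h1 : pvSplit '[' (']' :: rest) = (']' :: p) :: ps := by
        simp [pvSplit, hps]
      obtain ⟨q, qs, hq⟩ := pvSplit_cons_exists ']' p
      have h2 : pvSplit ']' (']' :: p) = [] :: q :: qs := by simp [pvSplit, hq]
      simp [pvH, h1, h2, hq, pvCum]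
    · by_cases ho : c = '['
      · subst ho
        have hA : pvALoop ('[' :: rest) ([] : List String) acc = pvALoop rest [] [] := rfl
        have h1 : pvSplit '[' ('[' :: rest) = [] :: pvSplit '[' rest := by simp [pvSplit]
        rw [hA, ih _ hrest, h1, pvH_nil_acc]
        simp [pvH, pvSplit, pvCum]
      · have hA : pvALoop (c :: rest) ([] : List String) acc = pvALoop rest [] (acc ++ [c]) := by
          simp [pvALoop, hcn, hb, ho]
        rw [hA, ih _ hrest, hps]
        have h1 : pvSplit '[' (c :: rest) = (c :: p) :: ps := by simp [pvSplit, ho, hps]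
        obtain ⟨q, qs, hq⟩ := pvSplit_cons_exists ']' p
        have h2 : pvSplit ']' (c :: p) = (c :: q) :: qs := by simp [pvSplit, hb, hq]
        rw [h1]
        simp only [pvH, h2, hq, pvCum_cons]

-- A's loop with its break = A's loop on the pre-'\n' prefix
theorem pvALoop_takeWhile (chars : List Char) (delim : List String) (acc : List Char) :
    pvALoop chars delim acc = pvALoop (chars.takeWhile (· ≠ '\n')) delim acc := by
  induction chars generalizing delim acc with
  | nil => rfl
  | cons c rest ih =>
    rw [List.takeWhile_cons]
    by_cases hn : c = '\n'
    · subst hn; simp [pvALoop]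
    · rw [if_pos (by simp [hn])]
      simp only [pvALoop]
      split_ifs <;> first | rfl | apply ih

theorem pv_takeWhile_no_nl (l : List Char) : '\n' ∉ l.takeWhile (· ≠ '\n') := by
  intro h
  have := List.mem_takeWhile_imp h
  simp at this

-- pvSplit of a separator-free list
theorem pvSplit_count0 (sep : Char) (l : List Char) (h : l.count sep = 0) :
    pvSplit sep l = [l] := by
  induction l with
  | nil => rfl
  | cons c rest ih =>
    have hc : c ≠ sep := by
      intro hc; subst hc; simp [List.count_cons] at h
    have hr : rest.count sep = 0 := by
      simp [List.count_cons, hc] at h; omega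
    simp [pvSplit, hc, ih hr]

theorem pvSplit_headD (sep : Char) (l : List Char) :
    (pvSplit sep l).headD [] = l.takeWhile (· ≠ sep) := by
  induction l with
  | nil => simp [pvSplit]
  | cons c rest ih =>
    by_cases hc : c = sep
    · subst hc; simp [pvSplit, List.takeWhile_cons]
    · obtain ⟨p, ps, hps⟩ := pvSplit_cons_exists sep rest
      have ih' : p = rest.takeWhile (· ≠ sep) := by simpa [hps] using ih
      simp [pvSplit, hc, hps, List.takeWhile_cons, ih']

-- on a segment with at most one ']', the cumulative emitter is B's single token
theorem pvCum_le1 (s : List Char) (pre : List Char) (h : s.count ']' ≤ 1) :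
    pvCum (pvSplit ']' s) pre
      = if ']' ∈ s then [String.mk (pre ++ s.takeWhile (· ≠ ']'))] else [] := by
  induction s generalizing pre with
  | nil => simp [pvSplit, pvCum]
  | cons c rest ih =>
    by_cases hc : c = ']'
    · subst hc
      have hr : rest.count ']' = 0 := by simp [List.count_cons] at h; omega
      rw [show pvSplit ']' (']' :: rest) = [] :: pvSplit ']' rest from by simp [pvSplit],
        pvSplit_count0 _ _ hr]
      simp [pvCum, List.takeWhile_cons]
    · have hr : rest.count ']' ≤ 1 := by simp [List.count_cons, hc] at h; omega
      obtain ⟨p, ps, hps⟩ := pvSplit_cons_exists ']' rest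
      have h1 : pvSplit ']' (c :: rest) = (c :: p) :: ps := by simp [pvSplit, hc, hps]
      rw [h1, pvCum_cons, ← hps, ih _ hr]
      have hcc : ¬ (']' = c) := fun h' => hc h'.symm
      simp [List.takeWhile_cons, hc, hcc, List.mem_cons, List.append_assoc]

-- the cumulative flatMap collapses to B's filterMap when every segment has ≤ 1 ']'
theorem pvFlat_eq_filterMap (segs : List (List Char))
    (h : ∀ s ∈ segs, s.count ']' ≤ 1) :
    segs.flatMap (fun seg => pvCum (pvSplit ']' seg) [])
      = segs.filterMap
          (fun seg => if ']' ∈ seg then some (String.mk ((pvSplit ']' seg).headD [])) else none) := by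
  induction segs with
  | nil => rfl
  | cons s ss ih =>
    rw [List.flatMap_cons, List.filterMap_cons,
      pvCum_le1 s [] (h s List.mem_cons_self), ih (fun t ht => h t (List.mem_cons_of_mem _ ht)),
      pvSplit_headD]
    by_cases hm : ']' ∈ s <;> simp [hm]

-- characterisation of pvDouble by the '['-split
theorem pvDouble_iff (l : List Char) (seen : Bool) (h : List Char) (t : List (List Char))
    (hs : pvSplit '[' l = h :: t) :
    (pvDouble l seen = true
      ↔ ((if seen then 1 else 2) ≤ h.count ']' ∨ ∃ s ∈ t, 2 ≤ s.count ']')) := by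
  induction l generalizing seen h t with
  | nil =>
    simp [pvSplit] at hs
    obtain ⟨h1, h2⟩ := hs
    subst h1; subst h2
    cases seen <;> simp [pvDouble]
  | cons c rest ih =>
    obtain ⟨p, ps, hps⟩ := pvSplit_cons_exists '[' rest
    by_cases ho : c = '['
    · subst ho
      rw [show pvSplit '[' ('[' :: rest) = [] :: p :: ps from by simp [pvSplit, hps]] at hs
      injection hs with h1 h2
      subst h1; subst h2
      rw [show pvDouble ('[' :: rest) seen = pvDouble rest false from by simp [pvDouble],
        ih false p ps hps]
      cases seen <;> simp
    · by_cases hc : c = ']'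
      · subst hc
        have hsplit : pvSplit '[' (']' :: rest) = (']' :: p) :: ps := by simp [pvSplit, hps]
        rw [hsplit] at hs
        injection hs with h1 h2
        subst h1; subst h2
        rw [show pvDouble (']' :: rest) seen = (seen || pvDouble rest true) from by
          simp [pvDouble]]
        cases seen with
        | false =>
          rw [Bool.false_or, ih true p ps hps]
          simp [List.count_cons]
        | true => simp [List.count_cons]
      · have hsplit : pvSplit '[' (c :: rest) = (c :: p) :: ps := by simp [pvSplit, ho, hps]
        rw [hsplit] at hs
        injection hs with h1 h2
        subst h1; subst h2
        rw [show pvDouble (c :: rest) seen = pvDouble rest seen from by simp [pvDouble, hc, ho],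
          ih seen p ps hps]
        simp [List.count_cons, hc]

-- lengths: the cumulative emitter emits once per ']' of the segment
theorem pvCum_length (pieces : List (List Char)) (pre : List Char) :
    (pvCum pieces pre).length = pieces.length - 1 := by
  induction pieces generalizing pre with
  | nil => simp [pvCum]
  | cons p rest ih =>
    cases rest with
    | nil => simp [pvCum]
    | cons q qs => simp [pvCum, ih]

theorem pvSplit_length (sep : Char) (l : List Char) :
    (pvSplit sep l).length = l.count sep + 1 := by
  induction l with
  | nil => simp [pvSplit]
  | cons c rest ih =>
    by_cases hc : c = sep
    · subst hc; simp [pvSplit, List.count_cons, ih]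
    · obtain ⟨p, ps, hps⟩ := pvSplit_cons_exists sep rest
      have ih' : ps.length + 1 = rest.count sep + 1 := by simpa [hps] using ih
      simp [pvSplit, hc, hps, List.count_cons]
      omega

theorem pvSeg_len (s : List Char) :
    (pvCum (pvSplit ']' s) []).length = s.count ']' := by
  rw [pvCum_length, pvSplit_length]
  omega

-- B never emits more than A per segment
theorem pvLen_le (segs : List (List Char)) :
    (segs.filterMap
      (fun seg => if ']' ∈ seg then some (String.mk ((pvSplit ']' seg).headD [])) else none)).length
      ≤ (segs.flatMap (fun seg => pvCum (pvSplit ']' seg) [])).length := by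
  induction segs with
  | nil => simp
  | cons s ss ih =>
    by_cases hm : ']' ∈ s
    · rw [List.filterMap_cons_some (h := by rw [if_pos hm]), List.flatMap_cons,
        List.length_append, pvSeg_len, List.length_cons]
      have h1 : 1 ≤ s.count ']' := List.count_pos_iff.mpr hm
      omega
    · rw [List.filterMap_cons_none (h := by rw [if_neg hm]), List.flatMap_cons,
        List.length_append, pvSeg_len]
      omega

-- with a doubled ']' segment, B is strictly shorter than A
theorem pvLen_lt (segs : List (List Char)) (hw : ∃ s ∈ segs, 2 ≤ s.count ']') :
    (segs.filterMap
      (fun seg => if ']' ∈ seg then some (String.mk ((pvSplit ']' seg).headD [])) else none)).length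
      < (segs.flatMap (fun seg => pvCum (pvSplit ']' seg) [])).length := by
  induction segs with
  | nil => simp at hw
  | cons s ss ih =>
    obtain ⟨w, hw_mem, hw2⟩ := hw
    rcases List.mem_cons.mp hw_mem with h | h
    · subst h
      have hm : ']' ∈ w := List.count_pos_iff.mp (by omega)
      have hle := pvLen_le ss
      rw [List.filterMap_cons_some (h := by rw [if_pos hm]), List.flatMap_cons,
        List.length_append, pvSeg_len, List.length_cons]
      omega
    · have hlt := ih ⟨w, h, hw2⟩
      by_cases hm : ']' ∈ s
      · have h1 : 1 ≤ s.count ']' := List.count_pos_iff.mpr hm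
        rw [List.filterMap_cons_some (h := by rw [if_pos hm]), List.flatMap_cons,
          List.length_append, pvSeg_len, List.length_cons]
        omega
      · rw [List.filterMap_cons_none (h := by rw [if_neg hm]), List.flatMap_cons,
          List.length_append, pvSeg_len]
        omega

-- shared shape: on inputs through the '[' branch, A reduces to the cumulative flatMap
theorem pvA_branch (str : String) (hc0 : PySem.Str.pyGet? str 0 = some '/')
    (hc2 : PySem.Str.pyGet? str 2 = some '[') :
    determine_delimiter str
      = (pvSplit '[' ((str.toList.drop 3).takeWhile (· ≠ '\n'))).flatMap
          (fun seg => pvCum (pvSplit ']' seg) []) := by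
  have hc2' : PySem.List.pyGet? str.toList 2 = some '[' := hc2
  have hA : determine_delimiter str = pvALoop (str.toList.drop 3) [] [] := by
    unfold determine_delimiter; rw [hc0]; simp [hc2']
  rw [hA, pvALoop_takeWhile, pvLoop_eq_pvH _ _ (pv_takeWhile_no_nl _)]
  exact pvH_nil_acc _

theorem pvB_branch (str : String) (hc0 : PySem.Str.pyGet? str 0 = some '/')
    (hc2 : PySem.Str.pyGet? str 2 = some '[') :
    determine_delimiter_alt str
      = (pvSplit '[' ((str.toList.drop 3).takeWhile (· ≠ '\n'))).filterMap
          (fun seg => if ']' ∈ seg then some (String.mk ((pvSplit ']' seg).headD [])) else none) := by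
  have hc2' : PySem.List.pyGet? str.toList 2 = some '[' := hc2
  unfold determine_delimiter_alt; rw [hc0]; simp [hc2']

-- ===== VERDICT (by name: the statements are the Claim_ definitions above) =====
theorem determine_delimiter_spec : Claim_unchanged_determine_delimiter := by
  intro str _ hpre hnd
  obtain ⟨h1, h2⟩ := hpre
  obtain ⟨c0, hc0⟩ : ∃ c0, PySem.Str.pyGet? str 0 = some c0 := by
    have h0 : PySem.Str.pyGet? str 0 = str.toList[(0 : Nat)]? := by
      exact_mod_cast PySem.Str.pyGet?_natCast (s := str) (n := 0)
    rw [h0]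
    have hlt : 0 < str.toList.length := by simpa using h1
    exact ⟨str.toList[0], by simp [List.getElem?_eq_getElem hlt]⟩
  by_cases hsl : c0 = '/'
  · subst hsl
    obtain ⟨c2, hc2⟩ : ∃ c2, PySem.Str.pyGet? str 2 = some c2 := by
      have h3 : 3 ≤ str.length := h2 hc0
      have h0 : PySem.Str.pyGet? str 2 = str.toList[(2 : Nat)]? := by
        exact_mod_cast PySem.Str.pyGet?_natCast (s := str) (n := 2)
      rw [h0]
      have hlt : 2 < str.toList.length := by simpa using h3
      exact ⟨str.toList[2], by simp [List.getElem?_eq_getElem hlt]⟩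
    by_cases hb : c2 = '['
    · subst hb
      rw [pvA_branch str hc0 hc2, pvB_branch str hc0 hc2]
      have hdb : pvDouble ((str.toList.drop 3).takeWhile (· ≠ '\n')) false = false := by
        by_contra hx
        exact hnd ⟨hc0, hc2, by simpa using hx⟩
      obtain ⟨h, t, hs⟩ := pvSplit_cons_exists '[' ((str.toList.drop 3).takeWhile (· ≠ '\n'))
      have hiff := pvDouble_iff _ false h t hs
      rw [hdb] at hiff
      have hcounts : ∀ s ∈ h :: t, s.count ']' ≤ 1 := by
        intro s hmem
        rcases List.mem_cons.mp hmem with h' | h'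
        · subst h'
          by_contra hx
          exact absurd (hiff.mpr (Or.inl (by simp; omega))) (by simp)
        · by_contra hx
          exact absurd (hiff.mpr (Or.inr ⟨s, h', by omega⟩)) (by simp)
      rw [hs]
      exact pvFlat_eq_filterMap _ hcounts
    · have hc2' : PySem.List.pyGet? str.toList 2 = some c2 := hc2
      have hA : determine_delimiter str = [String.mk [c2]] := by
        unfold determine_delimiter; rw [hc0]; simp [hc2', hb]
      have hB : determine_delimiter_alt str = [String.mk [c2]] := by
        unfold determine_delimiter_alt; rw [hc0]; simp [hc2', hb]
      rw [hA, hB]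
  · have hA : determine_delimiter str = [String.mk [',']] := by
      unfold determine_delimiter; rw [hc0]; simp [hsl]
    have hB : determine_delimiter_alt str = [","] := by
      unfold determine_delimiter_alt; rw [hc0]; simp [hsl]
    rw [hA, hB]
    decide

theorem determine_delimiter_changed : Claim_changed_determine_delimiter := by
  unfold Claim_changed_determine_delimiter; decide

theorem determine_delimiter_tight : Claim_exact_determine_delimiter := by
  intro str _ _ hd heq
  obtain ⟨hc0, hc2, hdb⟩ := hd
  rw [pvA_branch str hc0 hc2, pvB_branch str hc0 hc2] at heq
  obtain ⟨h, t, hs⟩ := pvSplit_cons_exists '[' ((str.toList.drop 3).takeWhile (· ≠ '\n'))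
  have hiff := pvDouble_iff _ false h t hs
  rw [hdb] at hiff
  have hw : ∃ s ∈ h :: t, 2 ≤ s.count ']' := by
    rcases hiff.mp rfl with h' | ⟨s, hmem, hcnt⟩
    · exact ⟨h, List.mem_cons_self, by simpa using h'⟩
    · exact ⟨s, List.mem_cons_of_mem _ hmem, hcnt⟩
  have hlt := pvLen_lt (h :: t) hw
  rw [hs] at heq
  rw [heq] at hlt
  omega
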